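-- pv_equiv track=rewrite | github.com/gurmit00/dropshipping-gary | gary_standalone_API_call_v24_brightdata_working.py | extract_category_url
-- ===== SOURCE A (Python) =====
-- def extract_category_url(product):
--     bc = product.get("breadcrumbs", [])
--     filtered = [b for b in bc if b.get("value") and b.get("value") != "/"]
--     if filtered:
--         val = filtered[-1].get("value", "")
--         if val.startswith("http"):
--             return val
--         return "https://www.nykaafashion.com" + val
--     return ""
-- ===== SOURCE B (Python) =====
-- def extract_category_url(product):
--     for b in reversed(product.get("breadcrumbs", [])):
--         val = b.get("value")
--         if val and val != "/":
--             if val.startswith("http"):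
--                 return val
--             return "https://www.nykaafashion.com" + val
--     return ""
-- ===== Notes on version B (the rewrite author's own statement) =====
-- stated objective: simpler
-- what changed: Replaces build-a-filtered-list-then-take-last with a single reverse scan that returns at the first qualifying breadcrumb, maintaining no intermediate list.
import Mathlib
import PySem

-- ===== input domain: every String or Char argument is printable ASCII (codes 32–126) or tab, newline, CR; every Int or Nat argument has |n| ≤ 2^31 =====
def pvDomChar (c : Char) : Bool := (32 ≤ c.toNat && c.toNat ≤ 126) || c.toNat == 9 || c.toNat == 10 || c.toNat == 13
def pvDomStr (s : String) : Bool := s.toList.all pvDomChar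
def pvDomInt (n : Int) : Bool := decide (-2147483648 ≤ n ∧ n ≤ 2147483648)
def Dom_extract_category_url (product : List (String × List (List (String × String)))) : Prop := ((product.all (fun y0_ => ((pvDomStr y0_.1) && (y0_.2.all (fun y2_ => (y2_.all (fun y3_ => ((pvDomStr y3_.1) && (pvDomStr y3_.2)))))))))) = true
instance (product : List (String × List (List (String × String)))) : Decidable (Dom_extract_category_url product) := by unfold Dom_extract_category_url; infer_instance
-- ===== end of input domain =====

-- B replaces A's filter-then-take-last with a single early-exit reverse scan (objective: simpler).

-- ===== PORT A =====
-- the comprehension's predicate: b.get("value") and b.get("value") != "/"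
def pvBCCond (b : List (String × String)) : Bool :=
  match (PySem.Dict.mk b).get? "value" with
  | some v => v ≠ "" && v ≠ "/"
  | none => false

def extract_category_url (product : List (String × List (List (String × String)))) : String :=
  let bc := (PySem.Dict.mk product).getD "breadcrumbs" []
  let filtered := bc.filter pvBCCond
  match filtered.getLast? with
  | some b =>
    let val := (PySem.Dict.mk b).getD "value" ""
    if PySem.Str.startswith val "http" then val
    else "https://www.nykaafashion.com" ++ val
  | none => ""

-- ===== PORT B =====
-- the 'for b in reversed(bc)' loop body: first qualifying breadcrumb wins
def pvPick : List (List (String × String)) → String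
  | [] => ""
  | b :: rest =>
    match (PySem.Dict.mk b).get? "value" with
    | some v =>
      if v ≠ "" && v ≠ "/" then
        (if PySem.Str.startswith v "http" then v else "https://www.nykaafashion.com" ++ v)
      else pvPick rest
    | none => pvPick rest

def extract_category_url_alt (product : List (String × List (List (String × String)))) : String :=
  pvPick ((PySem.Dict.mk product).getD "breadcrumbs" []).reverse

-- ===== PRECONDITION & SPEC =====
def Spec_extract_category_url (product : List (String × List (List (String × String)))) (out : String) : Prop := out = extract_category_url_alt product
instance (product : List (String × List (List (String × String)))) (out : String) : Decidable (Spec_extract_category_url product out) := by unfold Spec_extract_category_url; infer_instance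

-- ===== CLAIM (what is proved, stated in full; the proofs are below) =====
def Claim_equal_extract_category_url : Prop := ∀ (product : List (String × List (List (String × String)))), Dom_extract_category_url product → Spec_extract_category_url product (extract_category_url product)

-- ===== LEMMAS AND PROOFS =====

-- how A turns the last qualifying breadcrumb into the result
def pvMkUrl (b : List (String × String)) : String :=
  let val := (PySem.Dict.mk b).getD "value" ""
  if PySem.Str.startswith val "http" then val
  else "https://www.nykaafashion.com" ++ val

theorem pvPick_eq_filter_head? (bs : List (List (String × String))) :
    pvPick bs = match (bs.filter pvBCCond).head? with
      | some b => pvMkUrl b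
      | none => "" := by
  induction bs with
  | nil => rfl
  | cons b rest ih =>
    by_cases h : pvBCCond b = true
    · simp only [List.filter_cons, h, if_pos, List.head?_cons]
      unfold pvBCCond at h
      unfold pvPick pvMkUrl
      cases hg : (PySem.Dict.mk b).get? "value" with
      | none => rw [hg] at h; simp at h
      | some v =>
        rw [hg] at h
        simp only [h, if_pos]
        rw [PySem.Dict.getD_eq_get?_getD, hg]
        rfl
    · have h' : pvBCCond b = false := by simpa using h
      simp only [List.filter_cons, h']
      unfold pvPick
      unfold pvBCCond at h'
      cases hg : (PySem.Dict.mk b).get? "value" with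
      | none => exact ih
      | some v =>
        rw [hg] at h'
        simp only [h']
        simpa using ih

-- ===== VERDICT (by name: the statement is the Claim_ definition above) =====
theorem extract_category_url_spec : Claim_equal_extract_category_url := by
  intro product _
  unfold Spec_extract_category_url extract_category_url extract_category_url_alt
  rw [pvPick_eq_filter_head?]
  simp only [List.filter_reverse, List.head?_reverse]
  cases ((PySem.Dict.mk product).getD "breadcrumbs" []).filter pvBCCond |>.getLast? with
  | none => rfl
  | some b => rfl
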